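-- pv_equiv track=rewrite | github.com/halfcurry/mpi-matmul | mpi_matrix_multiply.py | distribute_rows
-- ===== SOURCE A (Python) =====
-- def distribute_rows(A, size):
--     """
--     Distributes rows of matrix A (list of lists) to processes, handling uneven division.
--     This function calculates which rows each MPI process will receive.
--
--     Args:
--         A (list of lists): The full input matrix.
--         size (int): The total number of MPI processes.
--
--     Returns:
--         tuple: A tuple containing:
--             - send_data (list of list of lists): A list where each element is a
--                                                  sub-matrix (chunk of rows) for one process.
--             - rows_per_process (list of int): Number of rows assigned to each process.
--             - displacements (list of int): Starting row index for each process's chunk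
--                                           in the original matrix.
--     """
--     total_rows = len(A)
--
--     # 1. Calculate base number of rows for each process.
--     #    Each process initially gets 'total_rows // size' rows.
--     rows_per_process = [total_rows // size] * size
--
--     # 2. Distribute remaining rows (if any) to the first few processes.
--     #    If total_rows is not perfectly divisible by size, there will be a remainder.
--     #    These extra rows are distributed one by one to the initial processes.
--     for i in range(total_rows % size):
--         rows_per_process[i] += 1
--
--     # 3. Calculate displacement (starting row index) for each process.
--     #    This helps to easily slice the original matrix.
--     #    e.g., if rows_per_process is [3, 2, 2], displacements will be [0, 3, 5]
--     displacements = [sum(rows_per_process[:i]) for i in range(size)]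
--
--     # 4. Create the chunks of data (sub-matrices) to be sent.
--     #    Each element in send_data is a slice (list of lists) from the original matrix A.
--     send_data = []
--     for i in range(size):
--         start_row = displacements[i]
--         end_row = start_row + rows_per_process[i]
--         send_data.append(A[start_row:end_row]) # Slices matrix A to get the chunk for process 'i'
--
--     return send_data, rows_per_process, displacements
-- ===== SOURCE B (Python) =====
-- def distribute_rows(A, size):
--     # Single fused pass: a running prefix-sum offset serves as the displacement,
--     # so no displacement is ever recomputed from a list prefix.
--     total_rows = len(A)
--     base = total_rows // size
--     extra = total_rows % size
--     send_data, rows_per_process, displacements = [], [], []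
--     start = 0
--     for i in range(size):
--         count = base + 1 if i < extra else base
--         send_data.append(A[start:start + count])
--         rows_per_process.append(count)
--         displacements.append(start)
--         start += count
--     return send_data, rows_per_process, displacements
-- ===== Notes on version B (the rewrite author's own statement) =====
-- stated objective: alternative
-- what changed: One fused pass keeping a running prefix-sum offset replaces A's three passes (replicate+mutate, sum-of-slice displacements recomputed per process, then a chunking loop).
import Mathlib
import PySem

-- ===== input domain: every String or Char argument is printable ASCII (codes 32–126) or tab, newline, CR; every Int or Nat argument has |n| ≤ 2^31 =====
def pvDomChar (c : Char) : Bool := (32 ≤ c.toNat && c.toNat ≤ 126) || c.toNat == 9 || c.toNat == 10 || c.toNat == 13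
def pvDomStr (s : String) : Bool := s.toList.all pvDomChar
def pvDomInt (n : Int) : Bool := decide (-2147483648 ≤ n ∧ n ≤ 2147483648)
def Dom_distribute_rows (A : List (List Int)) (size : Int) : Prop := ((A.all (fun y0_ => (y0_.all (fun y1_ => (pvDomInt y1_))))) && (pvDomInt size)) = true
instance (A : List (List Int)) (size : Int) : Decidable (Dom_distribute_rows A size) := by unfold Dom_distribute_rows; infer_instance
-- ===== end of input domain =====

-- B fuses A's three passes into one loop with a running prefix-sum offset (A recomputes each
-- displacement as sum(rows_per_process[:i])); proved equal for every size ≠ 0 (size = 0 raises in A).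


-- ===== PORT A =====
def distribute_rows (A : List (List Int)) (size : Int) : List (List (List Int)) × List Int × List Int :=
  let total_rows : Int := A.length
  -- [total_rows // size] * size
  let rows0 : List Int := List.replicate size.toNat (PySem.Int.floordiv total_rows size)
  -- for i in range(total_rows % size): rows_per_process[i] += 1
  -- (list index-assignment ported by hand via List.modify: exact for the nonnegative
  --  in-range indices this loop produces; Python raises out of range, excluded by Pre_)
  let rows_per_process : List Int :=
    (PySem.List.pyRange 0 (PySem.Int.mod total_rows size) 1).foldl
      (fun acc i => acc.modify i.toNat (· + 1)) rows0
  -- displacements = [sum(rows_per_process[:i]) for i in range(size)]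
  let displacements : List Int :=
    (PySem.List.pyRange 0 size 1).map
      (fun i => (PySem.List.slice rows_per_process none (some i)).sum)
  -- send_data loop
  let send_data : List (List (List Int)) :=
    (PySem.List.pyRange 0 size 1).foldl
      (fun sd i =>
        let start_row := PySem.List.pyGetD displacements i 0
        let end_row := start_row + PySem.List.pyGetD rows_per_process i 0
        sd ++ [PySem.List.slice A (some start_row) (some end_row)]) []
  (send_data, rows_per_process, displacements)

-- ===== PORT B =====
def distribute_rows_alt (A : List (List Int)) (size : Int) : List (List (List Int)) × List Int × List Int :=
  let total_rows : Int := A.length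
  let base := PySem.Int.floordiv total_rows size
  let extra := PySem.Int.mod total_rows size
  let st :=
    (PySem.List.pyRange 0 size 1).foldl
      (fun (s : List (List (List Int)) × List Int × List Int × Int) i =>
        let count := if i < extra then base + 1 else base
        (s.1 ++ [PySem.List.slice A (some s.2.2.2) (some (s.2.2.2 + count))],
         s.2.1 ++ [count], s.2.2.1 ++ [s.2.2.2], s.2.2.2 + count))
      ([], [], [], 0)
  (st.1, st.2.1, st.2.2.1)

-- ===== PRECONDITION & SPEC =====
-- A raises ZeroDivisionError exactly when size = 0; it returns on every other input.
def Pre_distribute_rows (A : List (List Int)) (size : Int) : Prop := size ≠ 0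
instance (A : List (List Int)) (size : Int) : Decidable (Pre_distribute_rows A size) := by unfold Pre_distribute_rows; infer_instance
def pvWitness_distribute_rows : List (List Int) × Int := ([[1], [2], [3]], 2)

def Spec_distribute_rows (A : List (List Int)) (size : Int) (out : List (List (List Int)) × List Int × List Int) : Prop := out = distribute_rows_alt A size
instance (A : List (List Int)) (size : Int) (out : List (List (List Int)) × List Int × List Int) : Decidable (Spec_distribute_rows A size out) := by unfold Spec_distribute_rows; infer_instance

-- ===== CLAIM (what is proved, stated in full; the proofs are below) =====
def Claim_equal_distribute_rows : Prop := ∀ (A : List (List Int)) (size : Int), Dom_distribute_rows A size → Pre_distribute_rows A size → Spec_distribute_rows A size (distribute_rows A size)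

-- ===== LEMMAS AND PROOFS =====

-- canonical per-process row count and prefix-sum offset (q = base rows, m = remainder)
def pvCnt (q : Int) (m : Nat) (j : Nat) : Int := if j < m then q + 1 else q
def pvOff (q : Int) (m : Nat) (j : Nat) : Int := ((List.range j).map (pvCnt q m)).sum

theorem pvOff_succ (q : Int) (m k : Nat) : pvOff q m (k + 1) = pvOff q m k + pvCnt q m k := by
  simp [pvOff, List.range_succ]

-- A's remainder loop turns the replicate list into the canonical count list
theorem pv_rows (q : Int) (n k : Nat) :
    (List.range k).foldl (fun acc j => acc.modify j (· + 1)) (List.replicate n q)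
      = (List.range n).map (pvCnt q k) := by
  induction k with
  | zero =>
    apply List.ext_getElem
    · simp
    · intro j h1 h2; simp [pvCnt]
  | succ k ih =>
    rw [List.range_succ, List.foldl_append, ih]
    simp only [List.foldl_cons, List.foldl_nil]
    apply List.ext_getElem
    · simp
    · intro j h1 h2
      rw [List.getElem_modify]
      simp only [List.getElem_map, List.getElem_range, pvCnt]
      have hj : j < n := by simpa using h2
      split_ifs <;> omega

-- B's fused loop computes the canonical triple plus the running offset
theorem pv_alt_loop (Amat : List (List Int)) (q : Int) (m k : Nat) :
    (List.range k).foldl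
      (fun (s : List (List (List Int)) × List Int × List Int × Int) (j : Nat) =>
        (s.1 ++ [PySem.List.slice Amat (some s.2.2.2) (some (s.2.2.2 + (if j < m then q + 1 else q)))],
         s.2.1 ++ [if j < m then q + 1 else q], s.2.2.1 ++ [s.2.2.2],
         s.2.2.2 + (if j < m then q + 1 else q)))
      ([], [], [], 0)
    = ((List.range k).map (fun j => PySem.List.slice Amat (some (pvOff q m j)) (some (pvOff q m j + pvCnt q m j))),
       (List.range k).map (pvCnt q m), (List.range k).map (pvOff q m), pvOff q m k) := by
  induction k with
  | zero => simp [pvOff]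
  | succ k ih =>
    rw [List.range_succ, List.foldl_append, ih]
    simp [pvOff_succ, pvCnt]

-- ===== VERDICT (by name: the statement is the Claim_ definition above) =====
theorem distribute_rows_spec : Claim_equal_distribute_rows := by
  intro A size _ hpre
  simp only [Spec_distribute_rows, distribute_rows, distribute_rows_alt]
  rcases lt_or_gt_of_ne hpre with hneg | hpos
  · -- size < 0: both sides are ([], [], [])
    have h1 : size.toNat = 0 := Int.toNat_of_nonpos (le_of_lt hneg)
    have h2 : PySem.Int.mod (A.length : Int) size ≤ 0 := (PySem.Int.mod_neg_bounds _ hneg).2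
    rw [PySem.List.pyRange_one_eq_nil h2, PySem.List.pyRange_one_eq_nil (le_of_lt hneg), h1]
    simp
  · -- size > 0
    obtain ⟨n, rfl⟩ := Int.eq_ofNat_of_zero_le (le_of_lt hpos)
    set q : Int := PySem.Int.floordiv (A.length : Int) (n : Int) with hq
    obtain ⟨m, hm⟩ := Int.eq_ofNat_of_zero_le (PySem.Int.mod_nonneg (A.length : Int) hpos)
    have hmn : m < n := by
      have := PySem.Int.mod_lt (A.length : Int) hpos
      rw [hm] at this; exact_mod_cast this
    rw [hm, PySem.List.pyRange_zero_nat m, PySem.List.pyRange_zero_nat n,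
        List.foldl_map, List.foldl_map, List.foldl_map, List.map_map, Int.toNat_natCast]
    simp only [Int.toNat_natCast, Nat.cast_lt]
    rw [pv_rows q n m, pv_alt_loop A q m n]
    -- displacements: sum of a prefix slice is the canonical offset
    have hdisp : (List.range n).map
        ((fun i => (PySem.List.slice ((List.range n).map (pvCnt q m)) none (some i)).sum) ∘ (fun k : Nat => (k : Int)))
        = (List.range n).map (pvOff q m) := by
      apply List.map_congr_left
      intro j hj
      have hjn : j < n := List.mem_range.mp hj
      simp only [Function.comp_apply, PySem.List.slice_to_natCast, ← List.map_take,
        List.take_range, pvOff]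
      rw [Nat.min_eq_left (le_of_lt hjn)]
    rw [hdisp]
    -- send_data: the indexed reads are the canonical count and offset
    rw [PySem.List.foldl_append_singleton_eq_map
      (fun (j : Nat) => PySem.List.slice A (some (PySem.List.pyGetD ((List.range n).map (pvOff q m)) ((j : Int)) 0))
        (some (PySem.List.pyGetD ((List.range n).map (pvOff q m)) ((j : Int)) 0 +
               PySem.List.pyGetD ((List.range n).map (pvCnt q m)) ((j : Int)) 0))) (List.range n) []]
    rw [List.nil_append]
    dsimp only
    refine congrArg (fun x => (x, _, _)) ?_
    apply List.map_congr_left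
    intro j hj
    have hjn : j < n := List.mem_range.mp hj
    simp [PySem.List.pyGetD_natCast, List.getElem?_range hjn]
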